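-- pv_equiv track=rewrite | github.com/goshuirc/irc | girc/formatting.py | _extract_irc_colour_code
-- ===== SOURCE A (Python) =====
-- digits = '0123456789'
--
-- def _extract_irc_colour_code(msg):
--     colour_code = ''
--     for i in range(2):
--         if len(msg) and msg[0] in digits:
--             char = msg[0]
--             colour_code += msg[0]
--             msg = msg[1:]
--             if char in '23456789' or (len(msg) and msg[0] in '6789'):
--                 break
--     return colour_code, msg
-- ===== SOURCE B (Python) =====
-- def _extract_irc_colour_code(msg):
--     if not msg or msg[0] not in '0123456789':
--         return '', msg
--     n = 2 if msg[0] in '01' and len(msg) >= 2 and msg[1] in '012345' else 1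
--     return msg[:n], msg[n:]
-- ===== Notes on version B (the rewrite author's own statement) =====
-- stated objective: simpler
-- what changed: Replaces A's 2-iteration accumulate-and-reslice loop with break flag by computing the leading digit count n (1 or 2, second digit iff first in '01' and second in '012345') and slicing the message once.
import Mathlib
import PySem

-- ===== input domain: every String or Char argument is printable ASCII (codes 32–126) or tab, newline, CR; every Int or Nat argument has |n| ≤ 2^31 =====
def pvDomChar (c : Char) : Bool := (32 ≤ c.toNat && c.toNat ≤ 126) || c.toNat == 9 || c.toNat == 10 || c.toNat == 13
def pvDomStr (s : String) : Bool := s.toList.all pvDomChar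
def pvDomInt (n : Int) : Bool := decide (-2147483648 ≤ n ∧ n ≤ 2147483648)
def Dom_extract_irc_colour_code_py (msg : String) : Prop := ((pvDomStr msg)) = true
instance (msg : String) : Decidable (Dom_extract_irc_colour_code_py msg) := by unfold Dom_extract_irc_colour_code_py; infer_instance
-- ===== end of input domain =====

-- B replaces A's flag-carrying two-pass loop (accumulate a string, re-slice msg per char)
-- by computing the digit count n directly and slicing once: objective = simpler.


-- ===== PORT A =====
-- the module constant `digits` and the string literals of A, as char lists
def pvDigits : List Char := ['0','1','2','3','4','5','6','7','8','9']
def pvHigh : List Char := ['2','3','4','5','6','7','8','9']     -- '23456789'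
def pvBrk : List Char := ['6','7','8','9']                      -- '6789'

-- one iteration of A's `for i in range(2)` body; the Bool is Python's `break` flag
def pvAIter (st : List Char × List Char × Bool) : List Char × List Char × Bool :=
  match st with
  | (cc, m, true) => (cc, m, true)
  | (cc, m, false) =>
    match m with
    | [] => (cc, m, false)           -- `len(msg)` is falsy
    | c :: rest =>
      if pvDigits.contains c then
        let cc' := cc ++ [c]         -- colour_code += msg[0]
        let m' := rest               -- msg = msg[1:]
        if pvHigh.contains c || (match m' with
            | [] => false
            | d :: _ => pvBrk.contains d) then (cc', m', true)   -- break
        else (cc', m', false)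
      else (cc, m, false)

def extract_irc_colour_code_py (msg : String) : String × String :=
  let st := (List.range 2).foldl (fun st _ => pvAIter st) (([] : List Char), msg.toList, false)
  (String.ofList st.1, String.ofList st.2.1)

-- ===== PORT B =====
def pvLow : List Char := ['0','1']                               -- '01'
def pvSecond : List Char := ['0','1','2','3','4','5']           -- '012345'

def extract_irc_colour_code_py_alt (msg : String) : String × String :=
  match msg.toList with
  | [] => ("", msg)
  | c :: rest =>
    if !pvDigits.contains c then ("", msg)
    else
      let n : Nat :=
        if pvLow.contains c && (match rest with
            | [] => false
            | d :: _ => pvSecond.contains d) then 2 else 1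
      (String.ofList (msg.toList.take n), String.ofList (msg.toList.drop n))

-- ===== PRECONDITION & SPEC =====
def Spec_extract_irc_colour_code_py (msg : String) (out : String × String) : Prop := out = extract_irc_colour_code_py_alt msg
instance (msg : String) (out : String × String) : Decidable (Spec_extract_irc_colour_code_py msg out) := by unfold Spec_extract_irc_colour_code_py; infer_instance

-- ===== CLAIM (what is proved, stated in full; the proofs are below) =====
def Claim_equal_extract_irc_colour_code_py : Prop := ∀ (msg : String), Dom_extract_irc_colour_code_py msg → Spec_extract_irc_colour_code_py msg (extract_irc_colour_code_py msg)

-- ===== LEMMAS AND PROOFS =====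

-- on digits, membership in '23456789' is the negation of membership in '01'
theorem pvHigh_iff_not_low {c : Char} (h : c ∈ pvDigits) : c ∈ pvHigh ↔ c ∉ pvLow := by
  simp [pvDigits] at h
  rcases h with h|h|h|h|h|h|h|h|h|h <;> subst h <;> decide

-- membership in '012345' is digit-hood minus membership in '6789'
theorem pvSecond_iff {d : Char} : d ∈ pvSecond ↔ d ∈ pvDigits ∧ d ∉ pvBrk := by
  by_cases h : d ∈ pvDigits
  · simp [pvDigits] at h
    rcases h with h|h|h|h|h|h|h|h|h|h <;> subst h <;> decide
  · constructor
    · intro hs; exact absurd (by simp [pvDigits]; simp [pvSecond] at hs; tauto) h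
    · rintro ⟨hd, -⟩; exact absurd hd h

-- ===== VERDICT (by name: the statement is the Claim_ definition above) =====
theorem extract_irc_colour_code_py_spec : Claim_equal_extract_irc_colour_code_py := by
  intro msg _
  unfold Spec_extract_irc_colour_code_py
  have hms : msg = String.ofList msg.toList := by simp
  rw [hms]
  generalize msg.toList = l
  unfold extract_irc_colour_code_py extract_irc_colour_code_py_alt
  rw [String.toList_ofList]
  match l with
  | [] => rfl
  | [c] =>
    by_cases hc : c ∈ pvDigits
    · have hhigh := pvHigh_iff_not_low hc
      by_cases hlow : c ∈ pvLow
      · have : c ∉ pvHigh := by rw [hhigh]; simp [hlow]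
        simp [List.range, List.range.loop, pvAIter, hc, hlow, this]
      · have : c ∈ pvHigh := hhigh.mpr hlow
        simp [List.range, List.range.loop, pvAIter, hc, hlow, this]
    · simp [List.range, List.range.loop, pvAIter, hc]
  | c :: d :: t =>
    by_cases hc : c ∈ pvDigits
    · have hhigh := pvHigh_iff_not_low hc
      by_cases hlow : c ∈ pvLow
      · have hnh : c ∉ pvHigh := by rw [hhigh]; simp [hlow]
        by_cases hd2 : d ∈ pvSecond
        · obtain ⟨hdig, hbrk⟩ := pvSecond_iff.mp hd2
          simp [List.range, List.range.loop, pvAIter, hc, hlow, hnh, hd2, hdig, hbrk]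
          split <;> split_ifs <;> simp
        · by_cases hb : d ∈ pvBrk
          · simp [List.range, List.range.loop, pvAIter, hc, hlow, hnh, hd2, hb]
          · have hnd : d ∉ pvDigits := fun hd => hd2 (pvSecond_iff.mpr ⟨hd, hb⟩)
            simp [List.range, List.range.loop, pvAIter, hc, hlow, hnh, hd2, hb, hnd]
      · have hh : c ∈ pvHigh := hhigh.mpr hlow
        simp [List.range, List.range.loop, pvAIter, hc, hlow, hh]
    · simp [List.range, List.range.loop, pvAIter, hc]
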